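-- pv_equiv track=rewrite | github.com/BearNSteen/advent-of-code-files | day14.py | tilt_right
-- ===== SOURCE A (Python) =====
-- def tilt_right(mountain2):
--     mountain = mountain2.copy()
--     for x in range(len(mountain)):
--         for y in range(len(mountain[x])-1, -1, -1):
--             pos = y
--             if mountain[x][y] == "O":
--                 while pos != -2 and pos+1 < len(mountain[x]):
--                     if mountain[x][pos+1] != ".":
--                         pos = -2
--                     else:
--                         mountain[x][pos+1] = "O"
--                         mountain[x][pos] = "."
--                         pos = pos+1
--     return mountain
-- ===== SOURCE B (Python) =====
-- def tilt_right(mountain2):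
--     # One right-to-left pass per row, tracking the next free slot (reset at each blocker);
--     # builds fresh rows (A mutates the shared inner rows in place).
--     out = []
--     for row in mountain2:
--         n = len(row)
--         new = ["."] * n
--         free = n - 1
--         for y in range(n - 1, -1, -1):
--             c = row[y]
--             if c == "O":
--                 new[free] = "O"
--                 free -= 1
--             elif c != ".":
--                 new[y] = c
--                 free = y - 1
--         out.append(new)
--     return out
-- ===== Notes on version B (the rewrite author's own statement) =====
-- stated objective: alternative
-- what changed: Replaces the per-rock while-loop that bubbles each 'O' rightward cell by cell with a single right-to-left pass per row that tracks the next free slot and resets it at each blocking cell, building fresh rows.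
import Mathlib
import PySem

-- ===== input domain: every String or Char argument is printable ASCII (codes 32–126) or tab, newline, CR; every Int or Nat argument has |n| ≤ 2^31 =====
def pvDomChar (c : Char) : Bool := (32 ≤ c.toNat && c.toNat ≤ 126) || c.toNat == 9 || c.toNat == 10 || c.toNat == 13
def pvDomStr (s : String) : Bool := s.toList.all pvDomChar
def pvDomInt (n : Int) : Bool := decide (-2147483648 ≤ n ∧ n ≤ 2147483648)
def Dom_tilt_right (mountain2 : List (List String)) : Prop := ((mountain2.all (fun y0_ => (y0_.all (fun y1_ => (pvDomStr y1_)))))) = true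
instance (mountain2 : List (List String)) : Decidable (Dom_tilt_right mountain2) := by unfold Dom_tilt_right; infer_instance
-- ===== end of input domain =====

-- B replaces A's per-rock cell-by-cell while-loop by a single right-to-left pass per row
-- tracking the next free slot, resetting at each blocking cell (objective: alternative). Equivalence is about the RETURN value only:
-- A mutates the inner rows of its argument in place (shallow copy), B does not.

-- ===== PORT A =====
-- A's while loop: bubble the "O" at index pos one cell rightward while the next cell is ".".
-- fuel only makes the loop total; fuel = len(row)+1 always exceeds the number of iterations
-- (pos strictly increases until the loop sets pos = -2 or runs off the row), so it is exact.
def pvWhileA (fuel : Nat) (row : List String) (pos : Int) : List String :=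
  match fuel with
  | 0 => row
  | f + 1 =>
    if pos ≠ -2 ∧ pos + 1 < (row.length : Int) then
      if row.getD (pos + 1).toNat "" ≠ "." then pvWhileA f row (-2)
      else pvWhileA f ((row.set (pos + 1).toNat "O").set pos.toNat ".") (pos + 1)
    else row

-- body of A's y-loop for one index y (pos starts at y; the while runs only when row[y] == "O")
def pvRowStepA (row : List String) (y : Nat) : List String :=
  if row.getD y "" = "O" then pvWhileA (row.length + 1) row (y : Int) else row

-- "for y in range(len(row)-1, -1, -1)": pvRowA k processes y = k-1, k-2, …, 0
def pvRowA (k : Nat) (row : List String) : List String :=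
  match k with
  | 0 => row
  | k + 1 => pvRowA k (pvRowStepA row k)

-- the x-loop reads and writes only mountain[x], so it is the per-row map (exact)
def tilt_right (mountain2 : List (List String)) : List (List String) :=
  mountain2.map (fun row => pvRowA row.length row)

-- ===== PORT B =====
-- B's single pass per row, y = k-1, k-2, …, 0, carrying (new, free)
def pvRowGoB (row : List String) (k : Nat) (new : List String) (free : Int) : List String :=
  match k with
  | 0 => new
  | k + 1 =>
    let c := row.getD k ""
    if c = "O" then pvRowGoB row k (new.set free.toNat "O") (free - 1)
    else if c = "." then pvRowGoB row k new free
    else pvRowGoB row k (new.set k c) ((k : Int) - 1)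

def tilt_right_alt (mountain2 : List (List String)) : List (List String) :=
  mountain2.map (fun row =>
    pvRowGoB row row.length (List.replicate row.length ".") ((row.length : Int) - 1))

-- ===== PRECONDITION & SPEC =====
def Spec_tilt_right (mountain2 : List (List String)) (out : List (List String)) : Prop := out = tilt_right_alt mountain2
instance (mountain2 : List (List String)) (out : List (List String)) : Decidable (Spec_tilt_right mountain2 out) := by unfold Spec_tilt_right; infer_instance

-- ===== CLAIM (what is proved, stated in full; the proofs are below) =====
def Claim_equal_tilt_right : Prop := ∀ (mountain2 : List (List String)), Dom_tilt_right mountain2 → Spec_tilt_right mountain2 (tilt_right mountain2)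

-- ===== LEMMAS AND PROOFS =====

-- reference tilt of one row: an "O" slides right past the leading dots of the already-tilted tail
def insO : List String → List String
  | [] => ["O"]
  | x :: t => if x = "." then "." :: insO t else "O" :: x :: t

def tiltSpec : List String → List String
  | [] => []
  | c :: s => if c = "O" then insO (tiltSpec s) else c :: tiltSpec s

theorem insO_length (l : List String) : (insO l).length = l.length + 1 := by
  induction l with
  | nil => rfl
  | cons x t ih => by_cases hx : x = "." <;> simp [insO, hx, ih]

theorem tiltSpec_length (s : List String) : (tiltSpec s).length = s.length := by
  induction s with
  | nil => rfl
  | cons c t ih => by_cases hc : c = "O" <;> simp [tiltSpec, hc, insO_length, ih]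

theorem insO_replicate (d : Nat) (M : List String) (hM : M.head? ≠ some ".") :
    insO (List.replicate d "." ++ M) = List.replicate d "." ++ "O" :: M := by
  induction d with
  | zero =>
    cases M with
    | nil => rfl
    | cons x t =>
      have hx : x ≠ "." := by simpa using hM
      simp [insO, hx]
  | succ d ih => simp [List.replicate_succ, insO, ih]

theorem pvGetAt {α : Type} (d : α) : ∀ (pre : List α) (x : α) (t : List α),
    (pre ++ x :: t).getD pre.length d = x := by
  intro pre
  induction pre with
  | nil => intro x t; rfl
  | cons a p ih => intro x t; simpa using ih x t

theorem pvSetAt {α : Type} : ∀ (pre : List α) (x y : α) (t : List α),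
    (pre ++ x :: t).set pre.length y = pre ++ y :: t := by
  intro pre
  induction pre with
  | nil => intro x y t; rfl
  | cons a p ih => intro x y t; simp [ih]

theorem pvWhileA_spec : ∀ (l : List String) (fuel : Nat) (pre : List String),
    l.length + 2 ≤ fuel →
    pvWhileA fuel (pre ++ "O" :: l) ((pre.length : Int)) = pre ++ insO l := by
  intro l
  induction l with
  | nil =>
    intro fuel pre hf
    obtain ⟨f, rfl⟩ : ∃ f, fuel = f + 1 := ⟨fuel - 1, by omega⟩
    have hguard : ¬ (((pre.length : Int)) ≠ -2 ∧ (pre.length : Int) + 1 < (((pre ++ ["O"]).length : Nat) : Int)) := by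
      simp
    rw [pvWhileA, if_neg hguard]
    simp [insO]
  | cons x t ih =>
    intro fuel pre hf
    obtain ⟨f, rfl⟩ : ∃ f, fuel = f + 1 := ⟨fuel - 1, by omega⟩
    have hlen : ((pre ++ "O" :: x :: t).length : Int) = pre.length + 2 + t.length := by
      simp; omega
    have hguard : ((pre.length : Int)) ≠ -2 ∧ (pre.length : Int) + 1 < ((pre ++ "O" :: x :: t).length : Int) := by
      constructor
      · omega
      · rw [hlen]; omega
    have hidx : ((pre.length : Int) + 1).toNat = pre.length + 1 := by omega
    have hget : (pre ++ "O" :: x :: t).getD (pre.length + 1) "" = x := by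
      have : pre ++ "O" :: x :: t = (pre ++ ["O"]) ++ x :: t := by simp
      rw [this]
      have := pvGetAt "" (pre ++ ["O"]) x t
      simpa using this
    rw [pvWhileA]
    rw [if_pos hguard, hidx, hget]
    by_cases hx : x = "."
    · subst hx
      rw [if_neg (by simp)]
      have hset1 : (pre ++ "O" :: "." :: t).set (pre.length + 1) "O" = pre ++ "O" :: "O" :: t := by
        have h1 : pre ++ "O" :: "." :: t = (pre ++ ["O"]) ++ "." :: t := by simp
        have h2 : pre ++ "O" :: "O" :: t = (pre ++ ["O"]) ++ "O" :: t := by simp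
        rw [h1, h2]
        have := pvSetAt (pre ++ ["O"]) "." "O" t
        simpa using this
      have hset2 : (pre ++ "O" :: "O" :: t).set (pre.length) "." = pre ++ "." :: "O" :: t := by
        simpa using pvSetAt pre "O" "." ("O" :: t)
      have htoNat : ((pre.length : Int)).toNat = pre.length := by omega
      rw [htoNat, hset1, hset2]
      have h3 : pre ++ "." :: "O" :: t = (pre ++ ["."]) ++ "O" :: t := by simp
      have h4 : (pre.length : Int) + 1 = (((pre ++ ["."]).length : Nat) : Int) := by simp
      rw [h3, h4, ih f (pre ++ ["."]) (by simp at hf ⊢; omega)]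
      simp [insO]
    · rw [if_pos hx]
      obtain ⟨g, rfl⟩ : ∃ g, f = g + 1 := ⟨f - 1, by simp at hf; omega⟩
      rw [pvWhileA]
      rw [if_neg (by simp)]
      simp [insO, hx]

theorem pvRowA_inv (row : List String) : ∀ (k : Nat), k ≤ row.length →
    pvRowA k (row.take k ++ tiltSpec (row.drop k)) = tiltSpec row := by
  intro k
  induction k with
  | zero => intro _; simp [pvRowA]
  | succ k ih =>
    intro hk
    have hklt : k < row.length := by omega
    have hgetrow : row[k]? = some (row[k]'hklt) := List.getElem?_eq_getElem hklt
    have htake : row.take (k + 1) = row.take k ++ [(row[k]'hklt)] := by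
      rw [List.take_succ, hgetrow]; rfl
    have hdrop : row.drop k = (row[k]'hklt) :: row.drop (k + 1) := by
      exact (List.getElem_cons_drop hklt).symm
    have hpre : (row.take k).length = k := by simp [List.length_take]; omega
    set c := (row[k]'hklt) with hc
    have hget : (row.take (k + 1) ++ tiltSpec (row.drop (k + 1))).getD k "" = c := by
      rw [htake, List.append_assoc]
      have := pvGetAt "" (row.take k) c (tiltSpec (row.drop (k + 1)))
      rw [hpre] at this
      simpa using this
    show pvRowA k (pvRowStepA (row.take (k + 1) ++ tiltSpec (row.drop (k + 1))) k) = tiltSpec row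
    by_cases hO : c = "O"
    · -- the while loop slides the "O" into the tilted tail
      have hlen : (row.take (k + 1) ++ tiltSpec (row.drop (k + 1))).length = row.length := by
        simp [tiltSpec_length, List.length_take]; omega
      have hr : row.take (k + 1) ++ tiltSpec (row.drop (k + 1))
          = row.take k ++ "O" :: tiltSpec (row.drop (k + 1)) := by
        rw [htake, hO]; simp
      have hfuel : (tiltSpec (row.drop (k + 1))).length + 2 ≤ row.length + 1 := by
        rw [tiltSpec_length]; simp; omega
      have hwhile := pvWhileA_spec (tiltSpec (row.drop (k + 1))) (row.length + 1) (row.take k) hfuel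
      rw [hpre] at hwhile
      have hstep : pvRowStepA (row.take (k + 1) ++ tiltSpec (row.drop (k + 1))) k
          = row.take k ++ insO (tiltSpec (row.drop (k + 1))) := by
        unfold pvRowStepA
        rw [if_pos (by rw [hget]; exact hO), hlen, hr, hwhile]
      rw [hstep]
      have : row.take k ++ insO (tiltSpec (row.drop (k + 1)))
          = row.take k ++ tiltSpec (row.drop k) := by
        rw [hdrop, hO]
        simp [tiltSpec]
      rw [this]
      exact ih (by omega)
    · have hstep : pvRowStepA (row.take (k + 1) ++ tiltSpec (row.drop (k + 1))) k
          = row.take (k + 1) ++ tiltSpec (row.drop (k + 1)) := by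
        unfold pvRowStepA
        rw [if_neg (by rw [hget]; exact hO)]
      rw [hstep]
      have : row.take (k + 1) ++ tiltSpec (row.drop (k + 1)) = row.take k ++ tiltSpec (row.drop k) := by
        rw [htake, hdrop]
        simp [tiltSpec, hO]
      rw [this]
      exact ih (by omega)

theorem pvRowA_spec (row : List String) : pvRowA row.length row = tiltSpec row := by
  have := pvRowA_inv row row.length (le_refl _)
  simpa [tiltSpec] using this

theorem pvRowGoB_inv (row : List String) : ∀ (k fp1 : Nat) (M : List String),
    k ≤ row.length → k ≤ fp1 →
    tiltSpec (row.drop k) = List.replicate (fp1 - k) "." ++ M →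
    M.head? ≠ some "." →
    pvRowGoB row k (List.replicate fp1 "." ++ M) ((fp1 : Int) - 1) = tiltSpec row := by
  intro k
  induction k with
  | zero =>
    intro fp1 M _ _ hT _
    show List.replicate fp1 "." ++ M = tiltSpec row
    have h0 : tiltSpec row = List.replicate fp1 "." ++ M := by simpa using hT
    exact h0.symm
  | succ k ih =>
    intro fp1 M hk hkf hT hM
    have hklt : k < row.length := by omega
    have hdrop : row.drop k = (row[k]'hklt) :: row.drop (k + 1) := (List.getElem_cons_drop hklt).symm
    have hget : row.getD k "" = (row[k]'hklt) := List.getD_eq_getElem row "" hklt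
    set c := (row[k]'hklt) with hc
    obtain ⟨g, rfl⟩ : ∃ g, fp1 = g + 1 := ⟨fp1 - 1, by omega⟩
    have hrep : List.replicate (g + 1) "." ++ M = List.replicate g "." ++ "." :: M := by
      simp [List.replicate_succ']
    show pvRowGoB row (k + 1) (List.replicate (g + 1) "." ++ M) (((g + 1 : Nat) : Int) - 1) = tiltSpec row
    rw [pvRowGoB]
    simp only [hget]
    by_cases hO : c = "O"
    · rw [if_pos hO]
      have htoNat : (((g + 1 : Nat) : Int) - 1).toNat = g := by omega
      have hset : (List.replicate (g + 1) "." ++ M).set g "O" = List.replicate g "." ++ "O" :: M := by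
        rw [hrep]
        have := pvSetAt (List.replicate g (".":String)) "." "O" M
        simpa using this
      rw [htoNat, hset]
      have hfree : ((g + 1 : Nat) : Int) - 1 - 1 = ((g : Nat) : Int) - 1 := by omega
      rw [hfree]
      apply ih g ("O" :: M) (by omega) (by omega)
      · rw [hdrop, hO]
        have hT' : tiltSpec (row.drop (k + 1)) = List.replicate (g - k) "." ++ M := by
          have : g + 1 - (k + 1) = g - k := by omega
          rw [← this]; exact hT
        rw [show tiltSpec ("O" :: row.drop (k + 1)) = insO (tiltSpec (row.drop (k + 1))) by simp [tiltSpec]]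
        rw [hT', insO_replicate _ _ hM]
      · simp
    · rw [if_neg hO]
      by_cases hD : c = "."
      · rw [if_pos hD]
        apply ih (g + 1) M (by omega) (by omega)
        · rw [hdrop, hD]
          have hrep2 : List.replicate (g + 1 - k) (".":String) ++ M = "." :: (List.replicate (g - k) "." ++ M) := by
            have : g + 1 - k = (g - k) + 1 := by omega
            rw [this]; simp [List.replicate_succ]
          rw [show tiltSpec ("." :: row.drop (k + 1)) = "." :: tiltSpec (row.drop (k + 1)) by simp [tiltSpec]]
          rw [hrep2]
          have : g + 1 - (k + 1) = g - k := by omega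
          rw [← this, ← hT]
        · exact hM
      · rw [if_neg hD]
        have hsplit : List.replicate (g + 1) (".":String) ++ M
            = List.replicate k "." ++ "." :: (List.replicate (g - k) "." ++ M) := by
          have : g + 1 = k + (1 + (g - k)) := by omega
          rw [this]
          simp [List.replicate_add, List.replicate_succ, List.append_assoc]
        have hset : (List.replicate (g + 1) "." ++ M).set k c
            = List.replicate k "." ++ c :: (List.replicate (g - k) "." ++ M) := by
          rw [hsplit]
          have := pvSetAt (List.replicate k (".":String)) "." c (List.replicate (g - k) "." ++ M)
          simpa using this
        rw [hset]
        apply ih k (c :: (List.replicate (g - k) "." ++ M)) (by omega) (le_refl _)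
        · rw [hdrop]
          have hT' : tiltSpec (row.drop (k + 1)) = List.replicate (g - k) "." ++ M := by
            have : g + 1 - (k + 1) = g - k := by omega
            rw [← this]; exact hT
          rw [show tiltSpec (c :: row.drop (k + 1)) = c :: tiltSpec (row.drop (k + 1)) by simp [tiltSpec, hO]]
          rw [hT']
          simp
        · simpa using hD

theorem pvRowGoB_spec (row : List String) :
    pvRowGoB row row.length (List.replicate row.length ".") ((row.length : Int) - 1) = tiltSpec row := by
  have := pvRowGoB_inv row row.length row.length [] (le_refl _) (le_refl _) (by simp [tiltSpec]) (by simp)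
  simpa using this

-- ===== VERDICT (by name: the statement is the Claim_ definition above) =====
theorem tilt_right_spec : Claim_equal_tilt_right := by
  intro m _
  unfold Spec_tilt_right tilt_right tilt_right_alt
  apply List.map_congr_left
  intro row _
  rw [pvRowA_spec, pvRowGoB_spec]
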